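-- pv_equiv track=rewrite | github.com/ProjectBM/AoC2024 | 07/code.py | solve
-- ===== SOURCE A (Python) =====
-- def solve(operators, target, numbers, idx, current_total):
--     if idx >= len(numbers):
--         return False
--
--     for op in operators:
--         new_total = current_total
--         if op == "+":
--             new_total += numbers[idx]
--         elif op == "*":
--             new_total *= numbers[idx]
--         elif op == "||":
--             new_total = shift_ten(current_total, numbers[idx]) + numbers[idx]
--
--         if new_total == target and idx == len(numbers) - 1:
--             return True
--
--         if new_total > target:
--             continue
--
--         is_solvable = solve(operators, target, numbers, idx + 1, new_total)
--
--         if is_solvable: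
--             return True
--     return False
--
-- def shift_ten(to_shift, with_shift):
--     places = 1
--     while with_shift >= 10:
--         places += 1
--         with_shift //= 10
--     return to_shift * (10**places)
-- ===== SOURCE B (Python) =====
-- def solve(operators, target, numbers, idx, current_total):
--     n = len(numbers)
--     if idx >= n:
--         return False
--     totals = {current_total}
--     j = idx
--     while j != n - 1:
--         num = numbers[j]
--         totals = {v
--                   for t in totals
--                   for v in (_combine(op, t, num) for op in operators)
--                   if v <= target}
--         j += 1
--     num = numbers[j]
--     return any(_combine(op, t, num) == target
--                for t in totals for op in operators)
--
--
-- def _digits(n):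
--     return _digits(n // 10) + 1 if n >= 10 else 1
--
--
-- def _combine(op, t, num):
--     if op == "+":
--         return t + num
--     if op == "*":
--         return t * num
--     if op == "||":
--         return t * 10 ** _digits(num) + num
--     return t
-- ===== Notes on version B (the rewrite author's own statement) =====
-- stated objective: alternative
-- what changed: A explores operator sequences by per-path depth-first backtracking (re-visiting equal running totals once per path); B is a level-wise dynamic programming that sweeps the positions once, carrying the deduplicated set of reachable running totals (pruned to <= target) and testing the target only at the last number.
-- outside the precondition, e.g. on solve(['x'], 5, [], -1, 5): A returns True, B raises IndexError; on solve(['x'], 3, [7], -2, 0): A returns False, B raises IndexError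
import Mathlib
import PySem

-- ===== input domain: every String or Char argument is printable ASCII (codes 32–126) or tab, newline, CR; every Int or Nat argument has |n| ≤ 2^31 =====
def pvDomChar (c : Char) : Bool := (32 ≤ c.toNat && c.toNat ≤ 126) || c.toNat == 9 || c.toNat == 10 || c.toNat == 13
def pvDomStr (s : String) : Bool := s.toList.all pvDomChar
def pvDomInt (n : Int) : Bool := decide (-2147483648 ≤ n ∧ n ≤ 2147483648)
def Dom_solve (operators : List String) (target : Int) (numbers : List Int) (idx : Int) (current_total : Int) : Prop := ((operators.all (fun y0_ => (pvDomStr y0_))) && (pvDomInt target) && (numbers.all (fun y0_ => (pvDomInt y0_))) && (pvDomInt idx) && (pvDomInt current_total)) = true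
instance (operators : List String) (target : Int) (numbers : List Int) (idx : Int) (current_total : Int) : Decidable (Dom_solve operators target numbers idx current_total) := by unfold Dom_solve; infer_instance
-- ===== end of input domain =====

-- B replaces A's per-path depth-first backtracking with a level-wise DP over the deduplicated
-- set of reachable running totals (objective: alternative).

-- ===== PORT A =====
-- Python 'shift_ten': while-loop counting decimal places of with_shift, then multiply.
def shift_ten_places (with_shift : Int) : Nat :=
  if 10 ≤ with_shift then shift_ten_places (PySem.Int.floordiv with_shift 10) + 1 else 1
termination_by with_shift.toNat
decreasing_by
  rw [PySem.Int.floordiv_eq_ediv_of_pos (by norm_num)]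
  omega

def shift_ten (to_shift : Int) (with_shift : Int) : Int :=
  to_shift * 10 ^ shift_ten_places with_shift

-- A's 'for op in operators: … return True … return False' is the List.any of the per-op body.
def solve (operators : List String) (target : Int) (numbers : List Int) (idx : Int) (current_total : Int) : Bool :=
  if _h : (numbers.length : Int) ≤ idx then false
  else
    operators.any fun op =>
      let num := PySem.List.pyGetD numbers idx 0
      let new_total :=
        if op = "+" then current_total + num
        else if op = "*" then current_total * num
        else if op = "||" then shift_ten current_total num + num
        else current_total
      if new_total = target ∧ idx = (numbers.length : Int) - 1 then true
      else if target < new_total then false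
      else solve operators target numbers (idx + 1) new_total
termination_by ((numbers.length : Int) - idx).toNat
decreasing_by omega

-- ===== PORT B =====
def pyDigits (n : Int) : Nat :=
  if 10 ≤ n then pyDigits (PySem.Int.floordiv n 10) + 1 else 1
termination_by n.toNat
decreasing_by
  rw [PySem.Int.floordiv_eq_ediv_of_pos (by norm_num)]
  omega

def combine (op : String) (t : Int) (num : Int) : Int :=
  if op = "+" then t + num
  else if op = "*" then t * num
  else if op = "||" then t * 10 ^ pyDigits num + num
  else t

-- level-wise frontier of reachable totals; the leading guard only makes the recursion total
-- (B's Python never calls _reach with idx ≥ len(numbers)).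
def reach (totals : PySem.Set Int) (operators : List String) (target : Int) (numbers : List Int) (idx : Int) : Bool :=
  if _h : (numbers.length : Int) ≤ idx then false
  else
    let num := PySem.List.pyGetD numbers idx 0
    if idx = (numbers.length : Int) - 1 then
      totals.any fun t => operators.any fun op => combine op t num = target
    else
      let nxt := totals.foldl (fun s t => operators.foldl (fun s op =>
        let v := combine op t num
        if v ≤ target then PySem.Set.add s v else s) s) PySem.Set.empty
      reach nxt operators target numbers (idx + 1)
termination_by ((numbers.length : Int) - idx).toNat
decreasing_by omega

def solve_alt (operators : List String) (target : Int) (numbers : List Int) (idx : Int) (current_total : Int) : Bool :=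
  if (numbers.length : Int) ≤ idx then false
  else reach (PySem.Set.ofList [current_total]) operators target numbers idx

-- ===== PRECONDITION & SPEC =====
-- Pre_ excludes exactly the inputs with idx < -len(numbers): there Python A either raises
-- (IndexError on numbers[idx] / RecursionError) or, when no operator matches "+","*","||",
-- returns a value that only depends on negative-index accidents B's _reach raises on.
def Pre_solve (operators : List String) (target : Int) (numbers : List Int) (idx : Int) (current_total : Int) : Prop :=
  -(numbers.length : Int) ≤ idx
instance (operators : List String) (target : Int) (numbers : List Int) (idx : Int) (current_total : Int) : Decidable (Pre_solve operators target numbers idx current_total) := by unfold Pre_solve; infer_instance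

def pvWitness_solve : List String × Int × List Int × Int × Int := (["+", "*", "||"], 190, [19, 10], 0, 0)

def Spec_solve (operators : List String) (target : Int) (numbers : List Int) (idx : Int) (current_total : Int) (out : Bool) : Prop := out = solve_alt operators target numbers idx current_total
instance (operators : List String) (target : Int) (numbers : List Int) (idx : Int) (current_total : Int) (out : Bool) : Decidable (Spec_solve operators target numbers idx current_total out) := by unfold Spec_solve; infer_instance

-- ===== CLAIM (what is proved, stated in full; the proofs are below) =====
def Claim_equal_solve : Prop := ∀ (operators : List String) (target : Int) (numbers : List Int) (idx : Int) (current_total : Int), Dom_solve operators target numbers idx current_total → Pre_solve operators target numbers idx current_total → Spec_solve operators target numbers idx current_total (solve operators target numbers idx current_total)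

-- ===== LEMMAS AND PROOFS =====

lemma digits_eq (w : Int) : pyDigits w = shift_ten_places w := by
  induction w using pyDigits.induct with
  | case1 n h ih => rw [pyDigits, shift_ten_places, if_pos h, if_pos h, ih]
  | case2 n h => rw [pyDigits, shift_ten_places, if_neg h, if_neg h]

lemma combine_eq (op : String) (t num : Int) :
    combine op t num =
      (if op = "+" then t + num
       else if op = "*" then t * num
       else if op = "||" then shift_ten t num + num
       else t) := by
  simp [combine, shift_ten, digits_eq]

lemma mem_inner (ops : List String) (t num target : Int) (s : PySem.Set Int) (x : Int) :
    x ∈ ops.foldl (fun s op =>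
        let v := combine op t num
        if v ≤ target then PySem.Set.add s v else s) s ↔
      x ∈ s ∨ ∃ op ∈ ops, combine op t num = x ∧ x ≤ target := by
  induction ops generalizing s with
  | nil => simp
  | cons op rest ih =>
    simp only [List.foldl_cons, ih]
    split_ifs with hv
    · simp only [PySem.Set.mem_add, List.mem_cons]
      constructor
      · rintro ((h | rfl) | h)
        · exact Or.inl h
        · exact Or.inr ⟨op, Or.inl rfl, rfl, hv⟩
        · rcases h with ⟨o, ho, h1, h2⟩; exact Or.inr ⟨o, Or.inr ho, h1, h2⟩
      · rintro (h | ⟨o, (rfl | ho), h1, h2⟩)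
        · exact Or.inl (Or.inl h)
        · exact Or.inl (Or.inr h1.symm)
        · exact Or.inr ⟨o, ho, h1, h2⟩
    · simp only [List.mem_cons]
      constructor
      · rintro (h | h)
        · exact Or.inl h
        · rcases h with ⟨o, ho, h1, h2⟩; exact Or.inr ⟨o, Or.inr ho, h1, h2⟩
      · rintro (h | ⟨o, (rfl | ho), h1, h2⟩)
        · exact Or.inl h
        · exact absurd (h1 ▸ h2) hv
        · exact Or.inr ⟨o, ho, h1, h2⟩

lemma mem_nxt (l : List Int) (ops : List String) (num target : Int) (s0 : PySem.Set Int) (x : Int) :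
    x ∈ l.foldl (fun s t => ops.foldl (fun s op =>
        let v := combine op t num
        if v ≤ target then PySem.Set.add s v else s) s) s0 ↔
      x ∈ s0 ∨ ∃ t ∈ l, ∃ op ∈ ops, combine op t num = x ∧ x ≤ target := by
  induction l generalizing s0 with
  | nil => simp
  | cons t rest ih =>
    simp only [List.foldl_cons, ih, mem_inner, List.mem_cons]
    constructor
    · rintro ((h | h) | h)
      · exact Or.inl h
      · rcases h with ⟨o, ho, h1, h2⟩; exact Or.inr ⟨t, Or.inl rfl, o, ho, h1, h2⟩
      · rcases h with ⟨u, hu, o, ho, h1, h2⟩; exact Or.inr ⟨u, Or.inr hu, o, ho, h1, h2⟩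
    · rintro (h | ⟨u, (rfl | hu), o, ho, h1, h2⟩)
      · exact Or.inl (Or.inl h)
      · exact Or.inl (Or.inr ⟨o, ho, h1, h2⟩)
      · exact Or.inr ⟨u, hu, o, ho, h1, h2⟩

lemma branch_eq (v target L idx : Int) (b : Bool) (hb : idx = L - 1 → b = false) :
    (if v = target ∧ idx = L - 1 then true else if target < v then false else b)
      = (if idx = L - 1 then decide (v = target) else decide (v ≤ target) && b) := by
  by_cases hL : idx = L - 1 <;> by_cases hv : v = target <;> by_cases hgt : target < v <;>
    simp_all

lemma solve_last (ops : List String) (target : Int) (nums : List Int) (idx t : Int)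
    (hlt : idx < (nums.length : Int)) (hlast : idx = (nums.length : Int) - 1) :
    solve ops target nums idx t =
      ops.any fun op => combine op t (PySem.List.pyGetD nums idx 0) = target := by
  rw [solve, dif_neg (by omega)]
  apply PySem.List.any_congr_mem
  intro op _
  have hb : idx = (nums.length : Int) - 1 →
      solve ops target nums (idx + 1) (combine op t (PySem.List.pyGetD nums idx 0)) = false := by
    intro h
    rw [solve]
    exact dif_pos (by omega)
  simp only [← combine_eq]
  rw [branch_eq _ _ _ _ _ hb, if_pos hlast]

lemma solve_mid (ops : List String) (target : Int) (nums : List Int) (idx t : Int)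
    (hlt : idx < (nums.length : Int)) (hlast : idx ≠ (nums.length : Int) - 1) :
    solve ops target nums idx t =
      ops.any fun op =>
        (decide (combine op t (PySem.List.pyGetD nums idx 0) ≤ target)) &&
          solve ops target nums (idx + 1) (combine op t (PySem.List.pyGetD nums idx 0)) := by
  rw [solve, dif_neg (by omega)]
  apply PySem.List.any_congr_mem
  intro op _
  have hb : idx = (nums.length : Int) - 1 →
      solve ops target nums (idx + 1) (combine op t (PySem.List.pyGetD nums idx 0)) = false :=
    fun h => absurd h hlast
  simp only [← combine_eq]
  rw [branch_eq _ _ _ _ _ hb, if_neg hlast]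

lemma reach_spec (ops : List String) (target : Int) (nums : List Int) :
    ∀ (n : Nat) (idx : Int) (S : PySem.Set Int), idx < (nums.length : Int) →
      (((nums.length : Int) - idx).toNat = n) →
      reach S ops target nums idx = S.any fun t => solve ops target nums idx t := by
  intro n
  induction n with
  | zero => intro idx S hlt hn; omega
  | succ m ih =>
    intro idx S hlt hn
    rw [reach, dif_neg (by omega)]
    by_cases hlast : idx = (nums.length : Int) - 1
    · rw [if_pos hlast]
      apply PySem.List.any_congr_mem
      intro t _
      rw [solve_last ops target nums idx t hlt hlast]
    · rw [if_neg hlast]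
      rw [ih (idx + 1) _ (by omega) (by omega)]
      rw [Bool.eq_iff_iff]
      simp only [List.any_eq_true]
      constructor
      · rintro ⟨x, hx, hsx⟩
        rw [mem_nxt] at hx
        rcases hx with h | ⟨t, ht, o, ho, h1, h2⟩
        · simp at h
        · refine ⟨t, ht, ?_⟩
          rw [solve_mid ops target nums idx t hlt hlast]
          simp only [List.any_eq_true]
          exact ⟨o, ho, by rw [h1]; simp [h2, hsx]⟩
      · rintro ⟨t, ht, hst⟩
        rw [solve_mid ops target nums idx t hlt hlast] at hst
        simp only [List.any_eq_true] at hst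
        rcases hst with ⟨o, ho, hbody⟩
        rw [Bool.and_eq_true, decide_eq_true_eq] at hbody
        refine ⟨combine o t (PySem.List.pyGetD nums idx 0), ?_, hbody.2⟩
        rw [mem_nxt]
        exact Or.inr ⟨t, ht, o, ho, rfl, hbody.1⟩

-- ===== VERDICT (by name: the statement is the Claim_ definition above) =====
theorem solve_spec : Claim_equal_solve := by
  intro ops target nums idx ct _hdom _hpre
  unfold Spec_solve solve_alt
  by_cases hge : (nums.length : Int) ≤ idx
  · rw [if_pos hge, solve, dif_pos hge]
  · rw [if_neg hge,
      reach_spec ops target nums ((nums.length : Int) - idx).toNat idx _ (by omega) rfl]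
    have : PySem.Set.ofList [ct] = [ct] := rfl
    rw [this]
    simp [List.any]
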